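-- pv_equiv track=rewrite | github.com/KozyarValeriy/Scraping | finder/FindInDB.py | split_url
-- ===== SOURCE A (Python) =====
-- def split_url(url: str) -> list:
--     """ Метод для разбиения ссылки на подссылки
--
--     :param url: ссылка, которую надо разбить на подссылки
--     :return: скписок из кортежей, в котором нулевой элемент - прямя ссылка,
--              а 1 элеметн - конечный элемент для ссылки.
--     """
--     first = []
--     pos_protocol = url.find('//')
--     pos_protocol = 0 if pos_protocol < 0 else pos_protocol + 2
--     count_links = 0
--     for pos in range(pos_protocol, len(url)):
--         if url[pos] == '/':
--             first.append(url[:pos])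
--             count_links += 1
--     first.append(url)
--     last = url.rsplit('/', count_links)
--     result = list(zip(first, last))
--     return result
-- ===== SOURCE B (Python) =====
-- def split_url(url: str) -> list:
--     """Same result as A: cumulative prefix concatenation over pre-split segments
--     instead of a character scan plus rsplit."""
--     pos = url.find('//')
--     start = 0 if pos < 0 else pos + 2
--     head, tail = url[:start], url[start:]
--     parts = tail.split('/')
--     result = []
--     prefix = ''
--     for i, part in enumerate(parts):
--         if i == 0:
--             prefix = head + part
--             result.append((prefix, prefix))
--         else:
--             prefix = prefix + '/' + part
--             result.append((prefix, part))
--     return result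
-- ===== Notes on version B (the rewrite author's own statement) =====
-- stated objective: alternative
-- what changed: B splits the tail once on '/' and builds each prefix by cumulative concatenation over the segments, replacing A's per-character position scan with repeated url[:pos] slicing and the final rsplit/zip.
import Mathlib
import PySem

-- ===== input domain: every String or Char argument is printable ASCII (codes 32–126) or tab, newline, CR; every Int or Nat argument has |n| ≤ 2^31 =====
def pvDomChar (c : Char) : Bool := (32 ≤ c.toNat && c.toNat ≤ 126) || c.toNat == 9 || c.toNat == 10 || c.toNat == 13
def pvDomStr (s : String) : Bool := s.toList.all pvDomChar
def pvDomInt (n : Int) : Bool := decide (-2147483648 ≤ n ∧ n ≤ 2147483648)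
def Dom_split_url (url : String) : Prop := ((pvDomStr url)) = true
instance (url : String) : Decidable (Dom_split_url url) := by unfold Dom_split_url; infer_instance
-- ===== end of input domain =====

-- B splits the tail once on '/' and builds prefixes by cumulative concatenation,
-- replacing A's per-character scan + rsplit + zip (objective: alternative decomposition).

-- ===== PORT A =====
-- hand port of url.rsplit('/', m) for the single-char separator '/' (exact for that
-- separator): scan the reversed characters, cutting at '/' while budget m remains.
def rsplitRev : List Char → Nat → List Char → List (List Char) → List (List Char)
  | [], _, cur, acc => cur :: acc
  | c :: rest, k, cur, acc =>
      if c = '/' then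
        match k with
        | 0 => rsplitRev rest 0 (c :: cur) acc
        | k' + 1 => rsplitRev rest k' [] (cur :: acc)
      else rsplitRev rest k (c :: cur) acc

def rsplitSlash (cs : List Char) (m : Nat) : List (List Char) :=
  rsplitRev cs.reverse m [] []

def split_url (url : String) : List (String × String) :=
  let cs := url.toList
  let posProtocol := PySem.Chars.find cs ['/', '/']
  let pp : Int := if posProtocol < 0 then 0 else posProtocol + 2
  let st := (PySem.List.pyRange pp (cs.length : Int) 1).foldl
      (fun (st : List (List Char) × Nat) pos =>
        match PySem.List.pyGet? cs pos with
        | some c => if c = '/' then (st.1 ++ [PySem.List.slice cs none (some pos)], st.2 + 1) else st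
        | none => st) ([], 0)
  let first := st.1 ++ [cs]
  let last := rsplitSlash cs st.2
  (first.zip last).map (fun p => (String.mk p.1, String.mk p.2))

-- ===== PORT B =====
-- hand port of tail.split('/') for the single-char separator '/' (exact for that separator)
def splitSlash : List Char → List (List Char)
  | [] => [[]]
  | c :: rest =>
      if c = '/' then [] :: splitSlash rest
      else
        match splitSlash rest with
        | p :: ps => (c :: p) :: ps
        | [] => [[c]]

def split_url_alt (url : String) : List (String × String) :=
  let cs := url.toList
  let pos := PySem.Chars.find cs ['/', '/']
  let start : Int := if pos < 0 then 0 else pos + 2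
  let head := PySem.List.slice cs none (some start)
  let tail := PySem.List.slice cs (some start) none
  let parts := splitSlash tail
  ((PySem.List.enumerate parts).foldl
    (fun (st : List Char × List (String × String)) ip =>
      if ip.1 = 0 then
        let pre := head ++ ip.2
        (pre, st.2 ++ [(String.mk pre, String.mk pre)])
      else
        let pre := st.1 ++ '/' :: ip.2
        (pre, st.2 ++ [(String.mk pre, String.mk ip.2)])) ([], [])).2

-- ===== PRECONDITION & SPEC =====
def Spec_split_url (url : String) (out : List (String × String)) : Prop := out = split_url_alt url
instance (url : String) (out : List (String × String)) : Decidable (Spec_split_url url out) := by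
  unfold Spec_split_url; infer_instance

-- ===== CLAIM (what is proved, stated in full; the proofs are below) =====
def Claim_equal_split_url : Prop := ∀ (url : String), Dom_split_url url → Spec_split_url url (split_url url)

-- ===== LEMMAS AND PROOFS =====

-- A's scanned prefixes, recursively: the prefixes of cs ending just before each '/'
def firsts (h : List Char) : List Char → List (List Char)
  | [] => []
  | c :: rest => if c = '/' then h :: firsts (h ++ ['/']) rest else firsts (h ++ [c]) rest

-- prefix list for parts with g as the completed first segment-prefix
def prefJoins2 (g : List Char) : List (List Char) → List (List Char)
  | [] => []
  | p :: ps => g :: prefJoins2 (g ++ '/' :: p) ps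

def joinTail : List (List Char) → List Char
  | [] => []
  | p :: ps => '/' :: p ++ joinTail ps

def modLast (cur : List Char) : List (List Char) → List (List Char)
  | [] => []
  | [p] => [p ++ cur]
  | p :: ps => p :: modLast cur ps

def bPairs (pre : List Char) : List (List Char) → List (String × String)
  | [] => []
  | p :: ps => (String.mk (pre ++ '/' :: p), String.mk p) :: bPairs (pre ++ '/' :: p) ps

theorem splitSlash_ne_nil (t : List Char) : splitSlash t ≠ [] := by
  induction t with
  | nil => simp [splitSlash]
  | cons c r ih =>
    simp only [splitSlash]
    split
    · simp
    · cases h : splitSlash r with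
      | nil => simp
      | cons p ps => simp

theorem splitSlash_cons_slash (r : List Char) :
    splitSlash ('/' :: r) = [] :: splitSlash r := by
  simp [splitSlash]

theorem splitSlash_cons_other (c : Char) (r p : List Char) (ps : List (List Char))
    (hc : c ≠ '/') (hr : splitSlash r = p :: ps) :
    splitSlash (c :: r) = (c :: p) :: ps := by
  simp only [splitSlash, if_neg hc, hr]

theorem firsts_eq (t : List Char) : ∀ (p : List Char) (ps : List (List Char)),
    splitSlash t = p :: ps → ∀ h : List Char, firsts h t = prefJoins2 (h ++ p) ps := by
  induction t with
  | nil =>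
    intro p ps hsp h
    simp only [splitSlash] at hsp
    cases hsp
    simp [firsts, prefJoins2]
  | cons c r ih =>
    intro p ps hsp h
    cases hq : splitSlash r with
    | nil => exact absurd hq (splitSlash_ne_nil r)
    | cons q qs =>
      by_cases hc : c = '/'
      · subst hc
        rw [splitSlash_cons_slash, hq] at hsp
        obtain ⟨hp, hps⟩ := List.cons_eq_cons.mp hsp
        subst hp; subst hps
        simp only [firsts, if_pos rfl, prefJoins2, List.append_nil]
        rw [ih q qs hq (h ++ ['/'])]
        simp
      · rw [splitSlash_cons_other c r q qs hc hq] at hsp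
        obtain ⟨hp, hps⟩ := List.cons_eq_cons.mp hsp
        subst hp; subst hps
        simp only [firsts, if_neg hc]
        rw [ih q qs hq (h ++ [c])]
        simp

theorem joinTail_eq (t : List Char) : ∀ (p : List Char) (ps : List (List Char)),
    splitSlash t = p :: ps → t = p ++ joinTail ps := by
  induction t with
  | nil =>
    intro p ps hsp
    simp only [splitSlash] at hsp
    cases hsp
    simp [joinTail]
  | cons c r ih =>
    intro p ps hsp
    cases hq : splitSlash r with
    | nil => exact absurd hq (splitSlash_ne_nil r)
    | cons q qs =>
      by_cases hc : c = '/'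
      · subst hc
        rw [splitSlash_cons_slash, hq] at hsp
        obtain ⟨hp, hps⟩ := List.cons_eq_cons.mp hsp
        subst hp; subst hps
        simp only [joinTail, List.nil_append]
        rw [ih q qs hq]
        simp
      · rw [splitSlash_cons_other c r q qs hc hq] at hsp
        obtain ⟨hp, hps⟩ := List.cons_eq_cons.mp hsp
        subst hp; subst hps
        simp only [List.cons_append]
        rw [ih q qs hq]

theorem modLast_nil (ps : List (List Char)) : modLast [] ps = ps := by
  induction ps with
  | nil => rfl
  | cons p ps ih =>
    cases ps with
    | nil => simp [modLast]
    | cons q qs => simp only [modLast]; rw [ih]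

theorem rsplitRev_zero (r : List Char) : ∀ cur acc,
    rsplitRev r 0 cur acc = (r.reverse ++ cur) :: acc := by
  induction r with
  | nil => intro cur acc; simp [rsplitRev]
  | cons c rest ih =>
    intro cur acc
    by_cases hc : c = '/'
    · subst hc; simp only [rsplitRev, if_pos rfl]; rw [ih]; simp
    · simp only [rsplitRev, if_neg hc]; rw [ih]; simp

theorem rsplitRev_count (t : List Char) :
    ∀ (rest : List Char) (k : Nat) (cur : List Char) (acc : List (List Char)),
    rsplitRev (t.reverse ++ rest) (t.count '/' + k) cur acc =
      match splitSlash t with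
      | [] => []
      | [p] => rsplitRev rest k (p ++ cur) acc
      | p :: ps => rsplitRev rest k p (modLast cur ps ++ acc) := by
  induction t with
  | nil => intro rest k cur acc; simp [splitSlash, rsplitRev]
  | cons c r ih =>
    intro rest k cur acc
    by_cases hc : c = '/'
    · subst hc
      have hcount : (('/' :: r).count '/' + k) = r.count '/' + (k + 1) := by
        simp [List.count_cons]; omega
      have harr : (('/' :: r).reverse ++ rest) = r.reverse ++ ('/' :: rest) := by simp
      rw [hcount, harr, ih]
      cases hr : splitSlash r with
      | nil => exact absurd hr (splitSlash_ne_nil r)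
      | cons p ps =>
        rw [splitSlash_cons_slash, hr]
        cases ps with
        | nil => simp [rsplitRev, modLast]
        | cons q qs => simp [rsplitRev, modLast]
    · have hcount : ((c :: r).count '/' + k) = r.count '/' + k := by
        simp [List.count_cons, hc]
      have harr : ((c :: r).reverse ++ rest) = r.reverse ++ (c :: rest) := by simp
      rw [hcount, harr, ih]
      cases hr : splitSlash r with
      | nil => exact absurd hr (splitSlash_ne_nil r)
      | cons p ps =>
        rw [splitSlash_cons_other c r p ps hc hr]
        cases ps with
        | nil => simp [rsplitRev, if_neg hc]
        | cons q qs => simp [rsplitRev, if_neg hc]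

theorem rsplitSlash_eq (h t : List Char) (p : List Char) (ps : List (List Char))
    (hsp : splitSlash t = p :: ps) :
    rsplitSlash (h ++ t) (t.count '/') = (h ++ p) :: ps := by
  unfold rsplitSlash
  have hrev : (h ++ t).reverse = t.reverse ++ h.reverse := by simp
  rw [hrev]
  have hcnt := rsplitRev_count t h.reverse 0 [] []
  rw [Nat.add_zero] at hcnt
  simp only [hsp] at hcnt
  cases ps with
  | nil => rw [hcnt]; simp [rsplitRev_zero]
  | cons q qs => rw [hcnt]; simp [rsplitRev_zero, modLast_nil]

-- A's loop, characterised
theorem loopA (t : List Char) : ∀ (h cs : List Char), cs = h ++ t →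
    ∀ (acc : List (List Char)) (cnt : Nat),
    (PySem.List.pyRange (h.length : Int) (cs.length : Int) 1).foldl
      (fun (st : List (List Char) × Nat) pos =>
        match PySem.List.pyGet? cs pos with
        | some c => if c = '/' then (st.1 ++ [PySem.List.slice cs none (some pos)], st.2 + 1) else st
        | none => st) (acc, cnt)
    = (acc ++ firsts h t, cnt + t.count '/') := by
  induction t with
  | nil =>
    intro h cs hcs acc cnt
    subst hcs
    rw [PySem.List.pyRange_one_eq_nil (by simp)]
    simp [firsts]
  | cons c r ih =>
    intro h cs hcs acc cnt
    have hlt : (h.length : Int) < (cs.length : Int) := by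
      subst hcs; simp
    rw [PySem.List.pyRange_one_cons hlt]
    have hget : PySem.List.pyGet? cs (h.length : Int) = some c := by
      subst hcs
      rw [PySem.List.pyGet?_natCast]
      simp
    have hslice : PySem.List.slice cs none (some (h.length : Int)) = h := by
      subst hcs
      rw [PySem.List.slice_to_natCast]
      simp
    have hcs' : cs = (h ++ [c]) ++ r := by simp [hcs]
    have hlen : ((h.length : Int) + 1) = (((h ++ [c]).length : Nat) : Int) := by simp
    simp only [List.foldl_cons, hget]
    by_cases hc : c = '/'
    · subst hc
      rw [if_pos rfl, hslice, hlen, ih (h ++ ['/']) cs hcs' (acc ++ [h]) (cnt + 1)]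
      rw [Prod.mk.injEq]
      exact ⟨by simp [firsts], by simp [List.count_cons]; omega⟩
    · rw [if_neg hc, hlen, ih (h ++ [c]) cs hcs' acc cnt]
      simp only [firsts, if_neg hc]
      refine Prod.ext ?_ ?_
      · rfl
      · simp [List.count_cons, hc]

-- B's loop over the enumerated tail (indices all positive), characterised
theorem loopB_tail (ps : List (List Char)) (head : List Char) :
    ∀ (i : Int), 0 < i → ∀ (pre : List Char) (res : List (String × String)),
    ((PySem.List.enumerate ps i).foldl
      (fun (st : List Char × List (String × String)) ip =>
        if ip.1 = 0 then
          (head ++ ip.2, st.2 ++ [(String.mk (head ++ ip.2), String.mk (head ++ ip.2))])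
        else
          (st.1 ++ '/' :: ip.2,
            st.2 ++ [(String.mk (st.1 ++ '/' :: ip.2), String.mk ip.2)])) (pre, res)).2
    = res ++ bPairs pre ps := by
  induction ps with
  | nil => intro i hi pre res; simp [PySem.List.enumerate, bPairs]
  | cons p ps ih =>
    intro i hi pre res
    have hne : i ≠ 0 := by omega
    simp only [PySem.List.enumerate, List.foldl_cons, if_neg hne]
    rw [ih (i + 1) (by omega)]
    simp [bPairs]

theorem zipMain (ps : List (List Char)) : ∀ (g x : List Char),
    ((prefJoins2 g ps ++ [g ++ joinTail ps]).zip (x :: ps)).map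
        (fun p => (String.mk p.1, String.mk p.2))
    = (String.mk g, String.mk x) :: bPairs g ps := by
  induction ps with
  | nil => intro g x; simp [prefJoins2, joinTail, bPairs]
  | cons p qs ih =>
    intro g x
    simp only [prefJoins2, joinTail, List.cons_append, List.zip_cons_cons, List.map_cons]
    have hih := ih (g ++ '/' :: p) p
    simp only [List.append_assoc, List.cons_append] at hih ⊢
    rw [hih]
    simp [bPairs]

-- start is a valid split point: pp.toNat ≤ cs.length
theorem pp_le (cs : List Char) :
    (if PySem.Chars.find cs ['/', '/'] < 0 then (0:Int) else PySem.Chars.find cs ['/', '/'] + 2).toNat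
      ≤ cs.length := by
  by_cases h : PySem.Chars.find cs ['/', '/'] < 0
  · simp [h]
  · rw [if_neg h]
    have h0 : 0 ≤ PySem.Chars.find cs ['/', '/'] := by omega
    have hspec := (PySem.Chars.find_spec (s := cs) (sub := ['/', '/']) h0).1
    have hlen := hspec.length_le
    simp [List.length_drop] at hlen
    have hle := PySem.Chars.find_le_length cs ['/', '/']
    omega

-- ===== VERDICT (by name: the statement is the Claim_ definition above) =====
theorem split_url_spec : Claim_equal_split_url := by
  intro url _
  unfold Spec_split_url
  show split_url url = split_url_alt url
  simp only [split_url, split_url_alt]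
  generalize url.toList = cs
  generalize hf : PySem.Chars.find cs ['/', '/'] = f
  have hfge : -1 ≤ f := hf ▸ PySem.Chars.neg_one_le_find cs ['/', '/']
  generalize hpp : (if f < 0 then (0:Int) else f + 2) = pp
  have hpp0 : 0 ≤ pp := by rw [← hpp]; split <;> omega
  have hle : pp.toNat ≤ cs.length := by
    have := pp_le cs
    rw [hf, hpp] at this
    exact this
  set n : Nat := pp.toNat with hn
  have hhead : PySem.List.slice cs none (some pp) = cs.take n := by
    rw [PySem.List.slice_to cs hpp0]
  have htail : PySem.List.slice cs (some pp) none = cs.drop n := by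
    rw [PySem.List.slice_from cs hpp0]
  set h := cs.take n with hh
  set t := cs.drop n with ht
  have hsplitcs : cs = h ++ t := by rw [hh, ht]; simp
  have hhl : (h.length : Int) = pp := by
    rw [hh]; simp [List.length_take]; omega
  have hloop := loopA t h cs hsplitcs [] 0
  rw [hhl] at hloop
  simp only [hloop, List.nil_append, Nat.zero_add]
  rw [hhead, htail]
  cases hparts : splitSlash t with
  | nil => exact absurd hparts (splitSlash_ne_nil t)
  | cons p ps =>
    rw [firsts_eq t p ps hparts h]
    have hlast := rsplitSlash_eq h t p ps hparts
    rw [hsplitcs, hlast]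
    have hcseq : h ++ t = (h ++ p) ++ joinTail ps := by
      conv_lhs => rw [joinTail_eq t p ps hparts]
      simp
    rw [hcseq]
    rw [zipMain ps (h ++ p) (h ++ p)]
    simp only [PySem.List.enumerate, List.foldl_cons, if_pos rfl, if_true,
      List.nil_append, zero_add]
    rw [loopB_tail ps h 1 (by omega) (h ++ p)
        [(String.mk (h ++ p), String.mk (h ++ p))]]
    simp
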